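-- pv_equiv track=rewrite | github.com/wmelvin/montage | montool_missing.py | get_opt_str
-- ===== SOURCE A (Python) =====
-- def get_opt_str(default, opt_name, content):
--     for opt in content:
--         if opt.strip().startswith(opt_name):
--             a = opt.split("=", 1)
--             if len(a) == 2:
--                 if a[0].strip() == opt_name:
--                     return a[1].strip("'\" ")
--     return default
-- ===== SOURCE B (Python) =====
-- def get_opt_str(default, opt_name, content):
--     # Build an index of all "key = value" lines once (first occurrence wins),
--     # then answer with a single lookup.
--     table = {}
--     for line in content:
--         parts = line.split("=", 1)
--         if len(parts) == 2:
--             key = parts[0].strip()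
--             if key not in table:
--                 table[key] = parts[1].strip("'\" ")
--     return table.get(opt_name, default)
-- ===== Notes on version B (the rewrite author's own statement) =====
-- stated objective: alternative
-- what changed: Replaces A's early-return scan (with its redundant startswith pre-check) by a populate-then-lookup shape: one pass builds a first-occurrence-wins dict of key->stripped value for every '='-line, and the answer is a single table.get(opt_name, default).
import Mathlib
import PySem

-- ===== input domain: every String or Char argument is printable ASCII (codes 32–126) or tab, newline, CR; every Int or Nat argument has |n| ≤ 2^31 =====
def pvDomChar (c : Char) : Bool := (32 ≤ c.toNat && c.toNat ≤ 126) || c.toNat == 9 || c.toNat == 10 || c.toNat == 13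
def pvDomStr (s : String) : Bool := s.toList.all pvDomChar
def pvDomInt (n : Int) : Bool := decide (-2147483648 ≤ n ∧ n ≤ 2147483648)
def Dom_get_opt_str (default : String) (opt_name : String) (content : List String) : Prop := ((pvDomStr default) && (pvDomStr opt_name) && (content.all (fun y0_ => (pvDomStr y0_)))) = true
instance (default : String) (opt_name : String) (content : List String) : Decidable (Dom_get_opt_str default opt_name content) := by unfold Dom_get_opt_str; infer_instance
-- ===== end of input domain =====

-- B replaces A's early-return scan by a one-pass first-wins dict build followed by a single lookup (alternative decomposition, same cost).


-- ===== PORT A =====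
-- shared helper: Python's  s.split("=", 1)  (sep is the non-empty literal "=", so splitMax? is always `some`)
def pvSplitEq1 (s : String) : List String := (PySem.Str.splitMax? s "=" 1).getD []

-- the for-loop of A: first matching line returns, else fall through to the default
def pvScanA (default : String) (opt_name : String) : List String → String
  | [] => default
  | opt :: rest =>
    if PySem.Str.startswith (PySem.Str.strip opt) opt_name then
      if (pvSplitEq1 opt).length = 2 then
        if PySem.Str.strip ((pvSplitEq1 opt).getD 0 "") = opt_name then
          PySem.Str.stripChars ((pvSplitEq1 opt).getD 1 "") "'\" "
        else pvScanA default opt_name rest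
      else pvScanA default opt_name rest
    else pvScanA default opt_name rest

def get_opt_str (default : String) (opt_name : String) (content : List String) : String :=
  pvScanA default opt_name content

-- ===== PORT B =====
-- the for-loop of B: build the table (first occurrence of a key wins)
def pvBuildB : List String → PySem.Dict String String → PySem.Dict String String
  | [], table => table
  | line :: rest, table =>
    if (pvSplitEq1 line).length = 2 then
      if table.contains (PySem.Str.strip ((pvSplitEq1 line).getD 0 "")) then pvBuildB rest table
      else pvBuildB rest (table.insert (PySem.Str.strip ((pvSplitEq1 line).getD 0 ""))
        (PySem.Str.stripChars ((pvSplitEq1 line).getD 1 "") "'\" "))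
    else pvBuildB rest table

def get_opt_str_alt (default : String) (opt_name : String) (content : List String) : String :=
  (pvBuildB content PySem.Dict.empty).getD opt_name default

-- ===== PRECONDITION & SPEC =====
def Spec_get_opt_str (default : String) (opt_name : String) (content : List String) (out : String) : Prop := out = get_opt_str_alt default opt_name content
instance (default : String) (opt_name : String) (content : List String) (out : String) : Decidable (Spec_get_opt_str default opt_name content out) := by unfold Spec_get_opt_str; infer_instance

-- ===== CLAIM (what is proved, stated in full; the proofs are below) =====
def Claim_equal_get_opt_str : Prop := ∀ (default : String) (opt_name : String) (content : List String), Dom_get_opt_str default opt_name content → Spec_get_opt_str default opt_name content (get_opt_str default opt_name content)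

-- ===== LEMMAS AND PROOFS =====

-- s.split("=", 1): characterisation of the fuel loop behind PySem.Chars.splitOnMax
theorem pvGo_msplit_zero (sep : List Char) (fuel : Nat) (l cur : List Char) (acc : List (List Char)) :
    PySem.Chars.splitOnMax.go sep fuel 0 l cur acc = ((cur.reverse ++ l) :: acc).reverse := by
  cases fuel <;> cases l <;> simp [PySem.Chars.splitOnMax.go]

theorem pvGo_spec (l : List Char) : ∀ (fuel : Nat) (cur : List Char) (acc : List (List Char)),
    l.length < fuel →
    PySem.Chars.splitOnMax.go ['='] fuel 1 l cur acc =
      acc.reverse ++ (if l.contains '=' then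
        [cur.reverse ++ l.takeWhile (· ≠ '='), (l.dropWhile (· ≠ '=')).tail]
      else [cur.reverse ++ l]) := by
  induction l with
  | nil =>
    intro fuel cur acc hf
    cases fuel with
    | zero => omega
    | succ f => simp [PySem.Chars.splitOnMax.go]
  | cons c rest ih =>
    intro fuel cur acc hf
    cases fuel with
    | zero => omega
    | succ f =>
      by_cases hc : c = '='
      · subst hc
        simp [PySem.Chars.splitOnMax.go, List.isPrefixOf, pvGo_msplit_zero]
      · have hns : ('=' = c) = False := by simp [eq_comm, hc]
        have : PySem.Chars.splitOnMax.go ['='] (f+1) 1 (c :: rest) cur acc =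
            PySem.Chars.splitOnMax.go ['='] f 1 rest (c :: cur) acc := by
          simp [PySem.Chars.splitOnMax.go, List.isPrefixOf, hns]
        rw [this, ih f (c :: cur) acc (by simpa using hf)]
        simp [hc, hns]

theorem pvSplitOnMax_eq (s : List Char) :
    PySem.Chars.splitOnMax s ['='] 1 =
      if s.contains '=' then [s.takeWhile (· ≠ '='), (s.dropWhile (· ≠ '=')).tail] else [s] := by
  unfold PySem.Chars.splitOnMax
  rw [if_neg (by omega)]
  simpa using pvGo_spec s (s.length + 1) [] [] (by omega)

theorem pvSplitEq1_eq (s : String) :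
    pvSplitEq1 s =
      if s.toList.contains '=' then
        [String.ofList (s.toList.takeWhile (· ≠ '=')), String.ofList ((s.toList.dropWhile (· ≠ '=')).tail)]
      else [String.ofList s.toList] := by
  unfold pvSplitEq1
  unfold PySem.Str.splitMax? PySem.Chars.splitMax?
  rw [if_neg (by simp)]
  rw [show ("=" : String).toList = ['='] from rfl, pvSplitOnMax_eq]
  by_cases h : '=' ∈ s.toList <;> simp [h]

-- decomposition of a line that contains '='
theorem pvLine_decomp (s : List Char) (h : s.contains '=' = true) :
    s = s.takeWhile (· ≠ '=') ++ '=' :: (s.dropWhile (· ≠ '=')).tail := by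
  induction s with
  | nil => simp at h
  | cons c cs ih =>
    by_cases hc : c = '='
    · subst hc
      simp
    · have hm : '=' ∈ cs := by
        have h' := h
        simp at h'
        rcases h' with h' | h'
        · exact absurd h'.symm hc
        · exact h'
      have hcs : cs.contains '=' = true := by simpa [List.contains_iff_mem] using hm
      conv_lhs => rw [ih hcs]
      simp [hc]

-- rstrip is a prefix
theorem pvRstrip_prefix (u : List Char) : PySem.Chars.rstrip u <+: u := by
  unfold PySem.Chars.rstrip
  have := List.dropWhile_suffix (l := u.reverse) PySem.Chars.isspace
  have h2 : (List.dropWhile PySem.Chars.isspace u.reverse).reverse <+: u.reverse.reverse :=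
    List.reverse_prefix.mpr this
  simpa using h2

-- THE redundancy fact: if the stripped part before '=' equals name, the stripped line startswith name
theorem pvStartswith_of_key (p0 p1 name : List Char) (h : PySem.Chars.strip p0 = name) :
    PySem.Chars.startswith (PySem.Chars.strip (p0 ++ '=' :: p1)) name = true := by
  rw [PySem.Chars.startswith_iff]
  by_cases hE : PySem.Chars.lstrip p0 = []
  · have : name = [] := by
      rw [← h]; unfold PySem.Chars.strip; rw [hE]; simp [PySem.Chars.rstrip]
    simp [this]
  · unfold PySem.Chars.strip PySem.Chars.lstrip at *
    rw [List.dropWhile_append, if_neg (by simpa [List.isEmpty_iff] using hE)]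
    set a := List.dropWhile PySem.Chars.isspace p0 with ha
    unfold PySem.Chars.rstrip
    have hrev : (a ++ '=' :: p1).reverse = p1.reverse ++ '=' :: a.reverse := by simp
    rw [hrev, List.dropWhile_append]
    have hprefix : name <+: a := by
      rw [← h]; exact pvRstrip_prefix a
    by_cases hw : (List.dropWhile PySem.Chars.isspace p1.reverse).isEmpty = true
    · rw [if_pos hw]
      have hsp : PySem.Chars.isspace '=' = false := by decide
      have : List.dropWhile PySem.Chars.isspace ('=' :: a.reverse) = '=' :: a.reverse := by
        simp [hsp]
      rw [this]
      simpa using hprefix.trans (List.prefix_append a ['='])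
    · rw [if_neg hw]
      have : (List.dropWhile PySem.Chars.isspace p1.reverse ++ '=' :: a.reverse).reverse
           = (a ++ ['=']) ++ (List.dropWhile PySem.Chars.isspace p1.reverse).reverse := by simp
      rw [this]
      exact hprefix.trans ((List.prefix_append a ['=']).trans (List.prefix_append _ _))

-- values already present survive the rest of B's build loop
theorem pvBuild_preserves (k : String) (v : String) :
    ∀ (rest : List String) (d : PySem.Dict String String), d.get? k = some v →
      (pvBuildB rest d).get? k = some v := by
  intro rest
  induction rest with
  | nil => intro d h; simpa [pvBuildB] using h
  | cons line rest ih =>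
    intro d h
    simp only [pvBuildB]
    split
    · split
      · exact ih d h
      · rename_i hlen hcon
        apply ih
        have hne : k ≠ PySem.Str.strip ((pvSplitEq1 line).getD 0 "") := by
          intro he
          rw [← he] at hcon
          rw [PySem.Dict.contains_eq_isSome_get?, h] at hcon
          simp at hcon
        rw [PySem.Dict.get?_insert_of_ne _ _ hne]
        exact h
    · exact ih d h

-- the key equivalence invariant: if the table does not yet know opt_name,
-- B's build-then-lookup equals A's scan on the remaining lines
theorem pvBuild_eq_scan (default opt_name : String) :
    ∀ (content : List String) (d : PySem.Dict String String), d.contains opt_name = false →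
      (pvBuildB content d).getD opt_name default = pvScanA default opt_name content := by
  intro content
  induction content with
  | nil =>
    intro d h
    simp [pvBuildB, pvScanA, PySem.Dict.getD_of_not_contains _ _ h]
  | cons line rest ih =>
    intro d h
    by_cases h2 : (pvSplitEq1 line).length = 2
    · have hcontains : line.toList.contains '=' = true := by
        by_contra hc
        rw [pvSplitEq1_eq, if_neg hc] at h2
        simp at h2
      have hparts : pvSplitEq1 line =
          [String.ofList (line.toList.takeWhile (· ≠ '=')),
           String.ofList ((line.toList.dropWhile (· ≠ '=')).tail)] := by
        rw [pvSplitEq1_eq, if_pos hcontains]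
      by_cases hk : PySem.Str.strip ((pvSplitEq1 line).getD 0 "") = opt_name
      · -- A returns here; B inserts the value and it survives the rest of the build
        have hstarts : PySem.Str.startswith (PySem.Str.strip line) opt_name = true := by
          have hkc : PySem.Chars.strip (line.toList.takeWhile (· ≠ '=')) = opt_name.toList := by
            have := congrArg String.toList hk
            rw [hparts] at this
            simpa [PySem.Str.strip] using this
          have := pvStartswith_of_key (line.toList.takeWhile (· ≠ '='))
              ((line.toList.dropWhile (· ≠ '=')).tail) opt_name.toList hkc
          rw [← pvLine_decomp line.toList hcontains] at this
          simpa [PySem.Str.startswith, PySem.Str.strip] using this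
        have hA : pvScanA default opt_name (line :: rest) =
            PySem.Str.stripChars ((pvSplitEq1 line).getD 1 "") "'\" " := by
          simp only [pvScanA]
          rw [if_pos hstarts, if_pos h2, if_pos hk]
        have hnotc : d.contains (PySem.Str.strip ((pvSplitEq1 line).getD 0 "")) = false := by
          rw [hk]; exact h
        have hB : pvBuildB (line :: rest) d =
            pvBuildB rest (d.insert (PySem.Str.strip ((pvSplitEq1 line).getD 0 ""))
              (PySem.Str.stripChars ((pvSplitEq1 line).getD 1 "") "'\" ")) := by
          simp only [pvBuildB]
          rw [if_pos h2, if_neg (by simpa using hnotc)]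
        rw [hA, hB]
        have hget : ((d.insert (PySem.Str.strip ((pvSplitEq1 line).getD 0 ""))
              (PySem.Str.stripChars ((pvSplitEq1 line).getD 1 "") "'\" "))).get?
              opt_name = some (PySem.Str.stripChars ((pvSplitEq1 line).getD 1 "") "'\" ") := by
          rw [← hk]; exact PySem.Dict.get?_insert_self _ _ _
        rw [PySem.Dict.getD_eq_get?_getD, pvBuild_preserves _ _ rest _ hget]
        rfl
      · -- key ≠ opt_name: A skips this line, B's insertion (if any) cannot shadow opt_name
        have hA : pvScanA default opt_name (line :: rest) = pvScanA default opt_name rest := by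
          simp only [pvScanA]
          by_cases hsw : PySem.Str.startswith (PySem.Str.strip line) opt_name = true
          · rw [if_pos hsw, if_pos h2, if_neg hk]
          · rw [if_neg hsw]
        rw [hA]
        simp only [pvBuildB]
        rw [if_pos h2]
        by_cases hcn : d.contains (PySem.Str.strip ((pvSplitEq1 line).getD 0 "")) = true
        · rw [if_pos hcn]
          exact ih d h
        · rw [if_neg hcn]
          apply ih
          rw [PySem.Dict.contains_insert]
          have hne : (opt_name == PySem.Str.strip ((pvSplitEq1 line).getD 0 "")) = false := by
            simp only [beq_eq_false_iff_ne, ne_eq]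
            intro he
            exact hk he.symm
          rw [hne, h]
          rfl
    · -- no '=' in the line: A's inner length test fails, B skips the line
      have hA : pvScanA default opt_name (line :: rest) = pvScanA default opt_name rest := by
        simp only [pvScanA]
        by_cases hsw : PySem.Str.startswith (PySem.Str.strip line) opt_name = true
        · rw [if_pos hsw, if_neg h2]
        · rw [if_neg hsw]
      rw [hA]
      simp only [pvBuildB]
      rw [if_neg h2]
      exact ih d h

-- ===== VERDICT (by name: the statement is the Claim_ definition above) =====
theorem get_opt_str_spec : Claim_equal_get_opt_str := by
  intro default opt_name content _
  unfold Spec_get_opt_str get_opt_str get_opt_str_alt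
  exact (pvBuild_eq_scan default opt_name content PySem.Dict.empty (by simp)).symm
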